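-- pv_equiv track=rewrite | github.com/lukaspfisterch/dbl-gateway | src/dbl_gateway/app.py | _ordered_tool_families
-- ===== SOURCE A (Python) =====
-- from typing import Any, Callable, Mapping, Sequence
--
-- _TOOL_FAMILY_ORDER: tuple[str, ...] = (
--     "web_read",
--     "retrieval",
--     "llm_assist",
--     "exec_like",
-- )
--
-- def _ordered_tool_families(families: Sequence[str]) -> list[str]:
--     seen: set[str] = set()
--     ordered: list[str] = []
--     wildcard = False
--     for family in families:
--         name = str(family).strip()
--         if not name or name in seen:
--             continue
--         if name == "*":
--             wildcard = True
--             seen.add(name)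
--             continue
--         seen.add(name)
--         ordered.append(name)
--     rank = {name: idx for idx, name in enumerate(_TOOL_FAMILY_ORDER)}
--     ordered.sort(key=lambda item: (rank.get(item, len(rank)), item))
--     if wildcard:
--         ordered.append("*")
--     return ordered
-- ===== SOURCE B (Python) =====
-- _TOOL_FAMILY_ORDER: tuple[str, ...] = (
--     "web_read",
--     "retrieval",
--     "llm_assist",
--     "exec_like",
-- )
--
-- def _ordered_tool_families(families):
--     cleaned = {str(f).strip() for f in families}
--     cleaned.discard("")
--     known = [name for name in _TOOL_FAMILY_ORDER if name in cleaned]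
--     unknown = sorted(cleaned - set(_TOOL_FAMILY_ORDER) - {"*"})
--     result = known + unknown
--     if "*" in cleaned:
--         result.append("*")
--     return result
-- ===== Notes on version B (the rewrite author's own statement) =====
-- stated objective: alternative
-- what changed: A dedupes while preserving first-occurrence order and then sorts everything once by the composite key (rank, name); B dedupes into a set, emits the known families by scanning the fixed _TOOL_FAMILY_ORDER table, sorts only the unknown names alphabetically, and appends the wildcard last.
import Mathlib
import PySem

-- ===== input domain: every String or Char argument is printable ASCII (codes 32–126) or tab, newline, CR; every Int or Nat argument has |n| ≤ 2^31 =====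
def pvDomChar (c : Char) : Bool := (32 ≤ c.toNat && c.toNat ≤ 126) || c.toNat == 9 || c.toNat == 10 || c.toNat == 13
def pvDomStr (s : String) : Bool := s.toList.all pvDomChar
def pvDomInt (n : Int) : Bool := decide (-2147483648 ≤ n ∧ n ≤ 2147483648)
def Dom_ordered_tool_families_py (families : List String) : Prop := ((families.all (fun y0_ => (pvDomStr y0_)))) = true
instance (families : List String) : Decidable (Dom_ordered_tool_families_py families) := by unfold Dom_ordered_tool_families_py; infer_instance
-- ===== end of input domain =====

-- B replaces A's composite-key sort of all names by a fixed-order table scan for the known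
-- families plus an alphabetical sort of only the unknown names (objective: alternative decomposition).


-- ===== PORT A =====
-- module constant _TOOL_FAMILY_ORDER (shared by both ports, as in the Python module)
def toolFamilyOrder : List String := ["web_read", "retrieval", "llm_assist", "exec_like"]

-- body of A's for-loop over `families` (state: seen, ordered, wildcard)
def stepA (st : PySem.Set String × List String × Bool) (family : String) :
    PySem.Set String × List String × Bool :=
  let name := PySem.Str.strip family
  if name == "" || PySem.Set.contains st.1 name then st
  else if name == "*" then (PySem.Set.add st.1 name, st.2.1, true)
  else (PySem.Set.add st.1 name, st.2.1 ++ [name], st.2.2)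

def ordered_tool_families_py (families : List String) : List String :=
  let st := families.foldl stepA (PySem.Set.empty, [], false)
  let rank : PySem.Dict String Int :=
    (PySem.List.enumerate toolFamilyOrder 0).foldl (fun d p => d.insert p.2 p.1) PySem.Dict.empty
  let ordered := PySem.List.sorted2 st.2.1
    (fun item => rank.getD item (rank.size : Int)) (fun item => item)
  if st.2.2 then ordered ++ ["*"] else ordered

-- ===== PORT B =====
def ordered_tool_families_py_alt (families : List String) : List String :=
  let cleaned := PySem.Set.discard (PySem.Set.ofList (families.map PySem.Str.strip)) ""
  let known := toolFamilyOrder.filter (fun name => PySem.Set.contains cleaned name)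
  let unknown := PySem.List.sorted
    (PySem.Set.diff (PySem.Set.diff cleaned (PySem.Set.ofList toolFamilyOrder)) ["*"])
    (fun x => x)
  let result := known ++ unknown
  if PySem.Set.contains cleaned "*" then result ++ ["*"] else result

-- ===== PRECONDITION & SPEC =====
def Spec_ordered_tool_families_py (families : List String) (out : List String) : Prop := out = ordered_tool_families_py_alt families
instance (families : List String) (out : List String) : Decidable (Spec_ordered_tool_families_py families out) := by unfold Spec_ordered_tool_families_py; infer_instance

-- ===== CLAIM (what is proved, stated in full; the proofs are below) =====
def Claim_equal_ordered_tool_families_py : Prop := ∀ (families : List String), Dom_ordered_tool_families_py families → Spec_ordered_tool_families_py families (ordered_tool_families_py families)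

-- ===== LEMMAS AND PROOFS =====

-- A's sort key: rank.get(item, len(rank)) for the literal rank dict of the module
def keyA (item : String) : Int :=
  (PySem.Dict.mk [("web_read", (0 : Int)), ("retrieval", 1), ("llm_assist", 2), ("exec_like", 3)]).getD item 4

lemma keyA_eq (item : String) :
    keyA item = if "web_read" = item then 0 else if "retrieval" = item then 1
      else if "llm_assist" = item then 2 else if "exec_like" = item then 3 else 4 := by
  simp only [keyA, PySem.Dict.getD_eq_get?_getD, PySem.Dict.get?_mk_cons, beq_iff_eq]
  split_ifs <;> rfl

lemma keyA_of_not_mem {item : String} (h : item ∉ toolFamilyOrder) : keyA item = 4 := by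
  simp [toolFamilyOrder] at h
  simp [keyA_eq, h.1, h.2.1, h.2.2.1, h.2.2.2, Ne.symm]

lemma keyA_lt_of_mem {item : String} (h : item ∈ toolFamilyOrder) : keyA item < 4 := by
  simp [toolFamilyOrder] at h
  rcases h with h|h|h|h <;> subst h <;> decide

lemma sorted2_lex (xs : List String) (k1 : String → Int) :
    PySem.List.sorted2 xs k1 (fun x => x) =
      PySem.List.sorted xs (fun x => toLex ((k1 x, x) : Int × String)) := by
  simp only [PySem.List.sorted2, PySem.List.sorted, if_neg (by decide : ¬(false = true))]
  have hfn : (fun a b : String => decide (k1 a < k1 b) || (!decide (k1 b < k1 a) && decide (a < b)))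
      = fun a b : String => decide (toLex ((k1 a, a) : Int × String) < toLex ((k1 b, b) : Int × String)) := by
    funext a b
    by_cases h1 : k1 a < k1 b <;> by_cases h2 : k1 b < k1 a <;>
      simp [Prod.Lex.lt_iff, h1, h2] <;> omega
  rw [hfn]

lemma sorted2_eq_of_perm_of_pairwise (xs ys : List String) (k1 : String → Int)
    (hperm : ys.Perm xs)
    (hpw : ys.Pairwise (fun a b => k1 a < k1 b ∨ (k1 a = k1 b ∧ a < b))) :
    PySem.List.sorted2 xs k1 (fun x => x) = ys := by
  rw [sorted2_lex]
  apply PySem.List.sorted_eq_of_perm_of_pairwise_lt _ _ _ hperm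
  refine hpw.imp ?_
  intro a b h
  rw [Prod.Lex.lt_iff]
  exact h

lemma ofList_filter (p : String → Bool) (xs : List String) :
    PySem.Set.ofList (xs.filter p) = (PySem.Set.ofList xs).filter p := by
  induction xs with
  | nil => rfl
  | cons x xs ih =>
    by_cases hp : p x
    · rw [List.filter_cons_of_pos hp, PySem.Set.ofList_cons, PySem.Set.ofList_cons,
        List.filter_cons_of_pos hp, ih]
      congr 1
      simp only [PySem.Set.discard, List.filter_filter]
      exact List.filter_congr (fun a _ => by rw [Bool.and_comm])
    · rw [List.filter_cons_of_neg hp, PySem.Set.ofList_cons, List.filter_cons_of_neg hp, ih]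
      simp only [PySem.Set.discard, List.filter_filter]
      apply (List.filter_congr ?_).symm
      intro a _
      by_cases hax : a = x
      · subst hax; simp [hp]
      · simp [hax]

lemma loopA (fams : List String) (s : PySem.Set String) :
    fams.foldl stepA (s, s.filter (fun n => !(n == "*")), s.contains "*") =
      (PySem.Set.update s ((fams.map PySem.Str.strip).filter (fun n => !(n == ""))),
       (PySem.Set.update s ((fams.map PySem.Str.strip).filter (fun n => !(n == "")))).filter
         (fun n => !(n == "*")),
       (PySem.Set.update s ((fams.map PySem.Str.strip).filter (fun n => !(n == "")))).contains "*") := by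
  induction fams generalizing s with
  | nil => simp [PySem.Set.update]
  | cons f rest ih =>
    rw [List.foldl_cons]
    have hmap : (f :: rest).map PySem.Str.strip = PySem.Str.strip f :: rest.map PySem.Str.strip := rfl
    rw [hmap]
    set name := PySem.Str.strip f with hname
    by_cases h0 : name = ""
    · have : stepA (s, s.filter (fun n => !(n == "*")), s.contains "*") f
          = (s, s.filter (fun n => !(n == "*")), s.contains "*") := by
        simp [stepA, ← hname, h0]
      rw [this, ih, List.filter_cons_of_neg (by simp [h0])]
    · rw [List.filter_cons_of_pos (by simp [h0])]
      by_cases hin : name ∈ s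
      · have hst : stepA (s, s.filter (fun n => !(n == "*")), s.contains "*") f
            = (s, s.filter (fun n => !(n == "*")), s.contains "*") := by
          simp [stepA, ← hname, PySem.Set.contains, hin]
        have hupd : PySem.Set.update s (name :: List.filter (fun n => !(n == "")) (rest.map PySem.Str.strip))
            = PySem.Set.update s (List.filter (fun n => !(n == "")) (rest.map PySem.Str.strip)) := by
          rw [PySem.Set.update_cons, PySem.Set.add_of_mem hin]
        rw [hst, hupd, ih]
      · have hadd : PySem.Set.add s name = s ++ [name] := PySem.Set.add_of_not_mem hin
        rw [PySem.Set.update_cons]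
        by_cases hstar : name = "*"
        · have hst : stepA (s, s.filter (fun n => !(n == "*")), s.contains "*") f
              = (PySem.Set.add s name, s.filter (fun n => !(n == "*")), true) := by
            have hin' : "*" ∉ s := hstar ▸ hin
            simp [stepA, ← hname, hstar, PySem.Set.contains, hin']
          rw [hst]
          have h1 : s.filter (fun n => !(n == "*")) = (PySem.Set.add s name).filter (fun n => !(n == "*")) := by
            rw [hadd, List.filter_append]
            simp [hstar]
          have h2 : (PySem.Set.add s name).contains "*" = true := by
            rw [hadd]
            simp [PySem.Set.contains, hstar]
          rw [h1, ← h2, ih]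
        · have hst : stepA (s, s.filter (fun n => !(n == "*")), s.contains "*") f
              = (PySem.Set.add s name, s.filter (fun n => !(n == "*")) ++ [name], s.contains "*") := by
            simp [stepA, ← hname, h0, hstar, PySem.Set.contains, hin]
          rw [hst]
          have h1 : s.filter (fun n => !(n == "*")) ++ [name] = (PySem.Set.add s name).filter (fun n => !(n == "*")) := by
            rw [hadd, List.filter_append]
            simp [hstar]
          have h2 : s.contains "*" = (PySem.Set.add s name).contains "*" := by
            rw [hadd]
            simp [PySem.Set.contains, Ne.symm hstar]
          rw [h1, h2, ih]

lemma main_sort (l : List String) (hn : l.Nodup) :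
    PySem.List.sorted2 l keyA (fun x => x) =
      toolFamilyOrder.filter (fun n => l.contains n) ++
        PySem.List.sorted (l.filter (fun x => !(toolFamilyOrder.contains x))) (fun x => x) := by
  set known := toolFamilyOrder.filter (fun n => l.contains n) with hknown
  set u := l.filter (fun x => !(toolFamilyOrder.contains x)) with hu
  set us := PySem.List.sorted u (fun x => x) with hus
  have hpermu : us.Perm u := PySem.List.sorted_perm u (fun x => x) false
  have hnu : u.Nodup := hn.filter _
  have hnus : us.Nodup := (hpermu.nodup_iff).mpr hnu
  have hnk : known.Nodup := (by decide : toolFamilyOrder.Nodup).filter _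
  have hmemus : ∀ x ∈ us, x ∉ toolFamilyOrder := by
    intro x hx
    have := hpermu.mem_iff.mp hx
    rw [hu, List.mem_filter] at this
    simpa using this.2
  have hmemk : ∀ x ∈ known, x ∈ toolFamilyOrder ∧ x ∈ l := by
    intro x hx
    rw [hknown, List.mem_filter] at hx
    exact ⟨hx.1, by simpa using hx.2⟩
  apply sorted2_eq_of_perm_of_pairwise
  · -- permutation
    have hdisj : List.Disjoint known us := by
      intro a hak haus
      exact (hmemus a haus) (hmemk a hak).1
    have hndall : (known ++ us).Nodup := List.Nodup.append hnk hnus hdisj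
    rw [List.perm_ext_iff_of_nodup hndall hn]
    intro a
    constructor
    · intro ha
      rcases List.mem_append.mp ha with h | h
      · exact (hmemk a h).2
      · have := hpermu.mem_iff.mp h
        rw [hu, List.mem_filter] at this
        exact this.1
    · intro ha
      by_cases ho : a ∈ toolFamilyOrder
      · exact List.mem_append.mpr (Or.inl (by rw [hknown, List.mem_filter]; exact ⟨ho, by simpa using ha⟩))
      · refine List.mem_append.mpr (Or.inr (hpermu.mem_iff.mpr ?_))
        rw [hu, List.mem_filter]
        exact ⟨ha, by simpa using ho⟩
  · -- pairwise
    rw [List.pairwise_append]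
    refine ⟨?_, ?_, ?_⟩
    · -- known: filter of the 4-element literal list
      rw [hknown]
      simp only [toolFamilyOrder, List.filter]
      cases l.contains "web_read" <;> cases l.contains "retrieval" <;>
        cases l.contains "llm_assist" <;> cases l.contains "exec_like" <;> decide
    · -- unknowns: strictly sorted, all with keyA = 4
      have hlt : us.Pairwise (fun a b => a < b) := by
        have hle := PySem.List.sorted_pairwise u (fun x => x)
        rw [← hus] at hle
        have hne : us.Pairwise (fun a b : String => a ≠ b) := hnus
        exact (hle.and hne).imp (fun h => lt_of_le_of_ne h.1 h.2)
      refine hlt.imp_of_mem ?_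
      intro a b ha hb hab
      right
      rw [keyA_of_not_mem (hmemus a ha), keyA_of_not_mem (hmemus b hb)]
      exact ⟨rfl, hab⟩
    · intro a ha b hb
      left
      rw [keyA_of_not_mem (hmemus b hb)]
      exact keyA_lt_of_mem (hmemk a ha).1


-- ===== VERDICT (by name: the statement is the Claim_ definition above) =====
theorem ordered_tool_families_py_spec : Claim_equal_ordered_tool_families_py := by
  intro families _
  show ordered_tool_families_py families = ordered_tool_families_py_alt families
  have hloop := loopA families []
  simp only [List.filter_nil, PySem.Set.update_nil_left] at hloop
  have hinit : ([] : PySem.Set String).contains "*" = false := rfl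
  set N := families.map PySem.Str.strip with hN
  set S := PySem.Set.ofList (N.filter (fun n => !(n == ""))) with hS
  set O := S.filter (fun n => !(n == "*")) with hO
  have hSnodup : S.Nodup := PySem.Set.nodup_ofList _
  have hOnodup : O.Nodup := hSnodup.filter _
  -- B's cleaned set IS S
  have hclean : PySem.Set.discard (PySem.Set.ofList N) "" = S := by
    rw [hS, ofList_filter]
    rfl
  -- unfold A
  show (let st := families.foldl stepA (PySem.Set.empty, [], false)
        let rank : PySem.Dict String Int :=
          (PySem.List.enumerate toolFamilyOrder 0).foldl (fun d p => d.insert p.2 p.1) PySem.Dict.empty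
        let ordered := PySem.List.sorted2 st.2.1
          (fun item => rank.getD item (rank.size : Int)) (fun item => item)
        if st.2.2 then ordered ++ ["*"] else ordered) = _
  have hkey : (fun item => ((PySem.List.enumerate toolFamilyOrder 0).foldl
      (fun d p => d.insert p.2 p.1) PySem.Dict.empty).getD item
        (((PySem.List.enumerate toolFamilyOrder 0).foldl
          (fun d p => d.insert p.2 p.1) PySem.Dict.empty).size : Int)) = keyA := rfl
  have hst : families.foldl stepA (PySem.Set.empty, [], false) = (S, O, S.contains "*") := by
    have : (PySem.Set.empty : PySem.Set String) = ([] : List String) := rfl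
    rw [this]
    exact hloop
  simp only [hst, hkey]
  -- unfold B
  show _ = (let cleaned := PySem.Set.discard (PySem.Set.ofList (families.map PySem.Str.strip)) ""
        let known := toolFamilyOrder.filter (fun name => PySem.Set.contains cleaned name)
        let unknown := PySem.List.sorted
          (PySem.Set.diff (PySem.Set.diff cleaned (PySem.Set.ofList toolFamilyOrder)) ["*"])
          (fun x => x)
        let result := known ++ unknown
        if PySem.Set.contains cleaned "*" then result ++ ["*"] else result)
  rw [← hN, hclean]
  have hmain := main_sort O hOnodup
  have hkn : toolFamilyOrder.filter (fun name => PySem.Set.contains S name)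
      = toolFamilyOrder.filter (fun n => O.contains n) := by
    apply List.filter_congr
    intro n hn
    have hne : n ≠ "*" := by
      rintro rfl
      revert hn
      decide
    have hmem : (n ∈ O) ↔ (n ∈ S) := by
      rw [hO, List.mem_filter]
      simp [hne]
    show PySem.Set.contains S n = O.contains n
    simp only [PySem.Set.contains]
    by_cases hns : n ∈ S
    · rw [List.contains_iff_mem.mpr hns, List.contains_iff_mem.mpr (hmem.mpr hns)]
    · rw [Bool.eq_false_iff.mpr (fun h => hns (List.contains_iff_mem.mp h)),
        Bool.eq_false_iff.mpr (fun h => hns (hmem.mp (List.contains_iff_mem.mp h)))]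
  have hofl : PySem.Set.ofList toolFamilyOrder = toolFamilyOrder := rfl
  have hun : PySem.Set.diff (PySem.Set.diff S toolFamilyOrder) ["*"]
      = O.filter (fun x => !(toolFamilyOrder.contains x)) := by
    show List.filter _ (List.filter _ S) = List.filter _ (List.filter _ S)
    rw [List.filter_filter, List.filter_filter]
    apply List.filter_congr
    intro x _
    by_cases hx : x = "*" <;> simp [PySem.Set.contains, hx]
  simp only [hofl, hun, hkn, ← hmain]
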